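-- pv_equiv track=rewrite | github.com/jamartineztelecoengineer84-dotcom/cognitive-pmo | seeds/seed_imputaciones_primitiva.py | detect_silo
-- ===== SOURCE A (Python) =====
-- SILO_KEYWORDS = {
--     "Backend":  ["backend", "api", "sql", "python", "java", "node"],
--     "Frontend": ["frontend", "react", "vue", "angular", "ui"],
--     "Redes":    ["redes", "network", "vpn", "port security", "switch", "router", "vlan", "dns"],
--     "Windows":  ["windows", "ad ", "dominio", "gpo"],
--     "DevOps":   ["devops", "docker", "kubernetes", "cloud", "aws", "azure", "gcp", "ci/cd", "linux"],
--     "BBDD":     ["bbdd", "database", "sql:", "oracle", "postgres", "mysql"],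
--     "Seguridad":["seguridad", "security", "firewall", "siem", "mfa", "pentest"],
--     "QA":       ["qa", "testing", "pruebas"],
--     "Soporte":  ["soporte", "helpdesk", "hardware"],
-- }
--
-- def detect_silo(perfil: str):
--     if not perfil:
--         return None
--     p = perfil.lower()
--     best, hits = None, 0
--     for silo, kws in SILO_KEYWORDS.items():
--         h = sum(1 for kw in kws if kw in p)
--         if h > hits:
--             best, hits = silo, h
--     return best if hits > 0 else None
-- ===== SOURCE B (Python) =====
-- SILO_KEYWORDS = {
--     "Backend":  ["backend", "api", "sql", "python", "java", "node"],
--     "Frontend": ["frontend", "react", "vue", "angular", "ui"],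
--     "Redes":    ["redes", "network", "vpn", "port security", "switch", "router", "vlan", "dns"],
--     "Windows":  ["windows", "ad ", "dominio", "gpo"],
--     "DevOps":   ["devops", "docker", "kubernetes", "cloud", "aws", "azure", "gcp", "ci/cd", "linux"],
--     "BBDD":     ["bbdd", "database", "sql:", "oracle", "postgres", "mysql"],
--     "Seguridad":["seguridad", "security", "firewall", "siem", "mfa", "pentest"],
--     "QA":       ["qa", "testing", "pruebas"],
--     "Soporte":  ["soporte", "helpdesk", "hardware"],
-- }
--
--
-- def _score(kws, p):
--     # recursive keyword hit count
--     if not kws: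
--         return 0
--     return (1 if kws[0] in p else 0) + _score(kws[1:], p)
--
--
-- def _best(items, p):
--     # recursive back-to-front selection: the head wins over the best of the
--     # tail whenever its score is at least as large (and positive)
--     if not items:
--         return (None, 0)
--     silo, kws = items[0]
--     s = _score(kws, p)
--     bs, bh = _best(items[1:], p)
--     return (silo, s) if s >= bh and s > 0 else (bs, bh)
--
--
-- def detect_silo(perfil: str):
--     if not perfil:
--         return None
--     return _best(list(SILO_KEYWORDS.items()), perfil.lower())[0]
-- ===== Notes on version B (the rewrite author's own statement) =====
-- stated objective: alternative
-- what changed: B replaces A's forward loop with a running (best, hits) accumulator and strict-> update by a pure recursive decomposition: a recursive keyword scorer plus a back-to-front recursive selection that combines the head with the best of the tail using a head-wins >= rule with the positivity threshold fused into the combine step, so no mutable state or final threshold check remains.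
import Mathlib
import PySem

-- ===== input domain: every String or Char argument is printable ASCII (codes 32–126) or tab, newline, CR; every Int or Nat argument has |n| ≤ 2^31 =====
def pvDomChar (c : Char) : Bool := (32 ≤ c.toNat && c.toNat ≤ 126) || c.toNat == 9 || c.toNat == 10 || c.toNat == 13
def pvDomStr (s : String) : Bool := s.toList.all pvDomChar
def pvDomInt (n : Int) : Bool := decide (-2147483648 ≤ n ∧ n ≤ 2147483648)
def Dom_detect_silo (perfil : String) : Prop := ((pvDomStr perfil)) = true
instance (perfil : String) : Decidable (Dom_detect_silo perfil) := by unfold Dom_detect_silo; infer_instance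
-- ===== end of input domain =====

-- B replaces A's forward loop with a running (best, hits) accumulator by a recursive
-- back-to-front selection with a head-wins ≥ rule and the positivity test fused in; same cost.

-- module constant shared by both Pythons
def SILO_KEYWORDS : List (String × List String) :=
  [("Backend",  ["backend", "api", "sql", "python", "java", "node"]),
   ("Frontend", ["frontend", "react", "vue", "angular", "ui"]),
   ("Redes",    ["redes", "network", "vpn", "port security", "switch", "router", "vlan", "dns"]),
   ("Windows",  ["windows", "ad ", "dominio", "gpo"]),
   ("DevOps",   ["devops", "docker", "kubernetes", "cloud", "aws", "azure", "gcp", "ci/cd", "linux"]),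
   ("BBDD",     ["bbdd", "database", "sql:", "oracle", "postgres", "mysql"]),
   ("Seguridad",["seguridad", "security", "firewall", "siem", "mfa", "pentest"]),
   ("QA",       ["qa", "testing", "pruebas"]),
   ("Soporte",  ["soporte", "helpdesk", "hardware"])]

-- ===== PORT A =====
def detect_silo (perfil : String) : Option String :=
  if perfil.toList = [] then none
  else
    let p := PySem.Str.lower perfil
    let r := SILO_KEYWORDS.foldl
      (fun (acc : Option String × Int) sk =>
        let h : Int := ((sk.2.filter (fun kw => PySem.Str.isIn kw p)).map (fun _ => (1 : Int))).sum
        if h > acc.2 then (some sk.1, h) else acc)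
      (none, 0)
    if r.2 > 0 then r.1 else none

-- ===== PORT B =====
-- recursive keyword hit count (_score in Source B)
def scoreB (kws : List String) (p : String) : Int :=
  match kws with
  | [] => 0
  | kw :: rest => (if PySem.Str.isIn kw p then (1 : Int) else 0) + scoreB rest p

-- recursive back-to-front selection (_best in Source B)
def bestB (items : List (String × List String)) (p : String) : Option String × Int :=
  match items with
  | [] => (none, 0)
  | (silo, kws) :: rest =>
      let s := scoreB kws p
      let bt := bestB rest p
      if s ≥ bt.2 ∧ s > 0 then (some silo, s) else bt

def detect_silo_alt (perfil : String) : Option String :=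
  if perfil.toList = [] then none
  else (bestB SILO_KEYWORDS (PySem.Str.lower perfil)).1

-- ===== PRECONDITION & SPEC =====
def Spec_detect_silo (perfil : String) (out : Option String) : Prop := out = detect_silo_alt perfil
instance (perfil : String) (out : Option String) : Decidable (Spec_detect_silo perfil out) := by unfold Spec_detect_silo; infer_instance

-- ===== CLAIM (what is proved, stated in full; the proofs are below) =====
def Claim_equal_detect_silo : Prop := ∀ (perfil : String), Dom_detect_silo perfil → Spec_detect_silo perfil (detect_silo perfil)

-- ===== LEMMAS AND PROOFS =====

-- A's running (best, hits) update, abstracted over the per-silo score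
def stepA (p : String) (acc : Option String × Int) (sk : String × List String) : Option String × Int :=
  if scoreB sk.2 p > acc.2 then (some sk.1, scoreB sk.2 p) else acc

-- A's filter/map/sum count equals B's recursive count
lemma score_eq (kws : List String) (p : String) :
    ((kws.filter (fun kw => PySem.Str.isIn kw p)).map (fun _ => (1 : Int))).sum = scoreB kws p := by
  induction kws with
  | nil => rfl
  | cons k t ih =>
      simp only [List.filter_cons, scoreB, ← ih]
      by_cases h : PySem.Chars.isIn k.toList p.toList <;> simp [PySem.Str.isIn, h]

lemma bestB_none_of_nonpos (l : List (String × List String)) (p : String)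
    (h : (bestB l p).2 ≤ 0) : (bestB l p).1 = none := by
  induction l with
  | nil => simp [bestB]
  | cons x t ih =>
      obtain ⟨silo, kws⟩ := x
      simp only [bestB] at h ⊢
      split_ifs at h ⊢ with hc
      · omega
      · exact ih h

-- core: A's foldl from any accumulator with nonnegative score equals B's recursive best
lemma foldl_eq_bestB (l : List (String × List String)) (p : String) (a : Option String × Int)
    (h0 : 0 ≤ a.2) :
    l.foldl (stepA p) a = if (bestB l p).2 > a.2 then bestB l p else a := by
  induction l generalizing a with
  | nil => simp [bestB]; omega
  | cons x t ih =>
      obtain ⟨silo, kws⟩ := x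
      simp only [List.foldl_cons, bestB]
      by_cases hs : scoreB kws p > a.2
      · have ha' : stepA p a (silo, kws) = (some silo, scoreB kws p) := by
          simp [stepA, hs]
        rw [ha', ih _ (le_of_lt (lt_of_le_of_lt h0 hs))]
        by_cases hb : (bestB t p).2 > scoreB kws p
        · have : ¬ (scoreB kws p ≥ (bestB t p).2 ∧ scoreB kws p > 0) := by omega
          simp only [this, if_false]
          have : ((bestB t p).2 > a.2) := by omega
          simp [this, hb]
        · have hc : scoreB kws p ≥ (bestB t p).2 ∧ scoreB kws p > 0 := ⟨by omega, by omega⟩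
          simp [hc, hb, hs]
      · have ha' : stepA p a (silo, kws) = a := by simp [stepA, hs]
        rw [ha', ih _ h0]
        by_cases hc : scoreB kws p ≥ (bestB t p).2 ∧ scoreB kws p > 0
        · have hb : ¬ ((bestB t p).2 > a.2) := by omega
          have hs' : ¬ (scoreB kws p > a.2) := hs
          simp [hc, hb, hs']
        · simp [hc]

-- ===== VERDICT (by name: the statement is the Claim_ definition above) =====
theorem detect_silo_spec : Claim_equal_detect_silo := by
  intro perfil _
  unfold Spec_detect_silo detect_silo detect_silo_alt
  by_cases he : perfil.toList = []
  · simp [he]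
  · simp only [he, if_false]
    set p := PySem.Str.lower perfil
    have hA : SILO_KEYWORDS.foldl
        (fun (acc : Option String × Int) sk =>
          let h : Int := ((sk.2.filter (fun kw => PySem.Str.isIn kw p)).map (fun _ => (1 : Int))).sum
          if h > acc.2 then (some sk.1, h) else acc) (none, 0)
        = SILO_KEYWORDS.foldl (stepA p) (none, 0) := by
      apply PySem.List.foldl_congr_mem
      intro acc sk _
      simp only [stepA, score_eq]
    rw [hA, foldl_eq_bestB SILO_KEYWORDS p (none, 0) le_rfl]
    by_cases hb : (bestB SILO_KEYWORDS p).2 > 0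
    · simp [hb]
    · simp only [hb, if_false]
      simp only [show ¬ ((0 : Int) > 0) by omega, if_false]
      exact (bestB_none_of_nonpos _ _ (by omega)).symm
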